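-- pv_equiv track=rewrite | github.com/nopoh28102/boot-mess | app.py | get_file_type_from_extension
-- ===== SOURCE A (Python) =====
-- ALLOWED_EXTENSIONS = {
--     'image': {'png', 'jpg', 'jpeg', 'gif', 'webp'},
--     'video': {'mp4', 'avi', 'mov', 'mkv', 'webm'},
--     'audio': {'mp3', 'wav', 'ogg', 'aac', 'm4a'},
--     'file': {'pdf', 'doc', 'docx', 'txt', 'zip', 'rar'}
-- }
--
-- def get_file_type_from_extension(filename):
--     """Determine file type from extension"""
--     if '.' not in filename:
--         return 'file'
--     extension = filename.rsplit('.', 1)[1].lower()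
--
--     for file_type, extensions in ALLOWED_EXTENSIONS.items():
--         if extension in extensions:
--             return file_type
--     return 'file'
-- ===== SOURCE B (Python) =====
-- # B: one left-to-right pass over the filename with an accumulator that resets at each dot,
-- # then a single lookup in a flat literal extension->category dict (no rsplit, no category loop).
-- EXT_TO_TYPE = {
--     'png': 'image', 'jpg': 'image', 'jpeg': 'image', 'gif': 'image', 'webp': 'image',
--     'mp4': 'video', 'avi': 'video', 'mov': 'video', 'mkv': 'video', 'webm': 'video',
--     'mp3': 'audio', 'wav': 'audio', 'ogg': 'audio', 'aac': 'audio', 'm4a': 'audio',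
--     'pdf': 'file', 'doc': 'file', 'docx': 'file', 'txt': 'file', 'zip': 'file', 'rar': 'file',
-- }
--
--
-- def get_file_type_from_extension(filename):
--     """Determine file type from extension"""
--     ext = None  # None until a dot is seen; afterwards the characters since the last dot
--     for ch in filename:
--         if ch == '.':
--             ext = ''
--         elif ext is not None:
--             ext += ch
--     if ext is None:
--         return 'file'
--     return EXT_TO_TYPE.get(ext.lower(), 'file')
-- ===== Notes on version B (the rewrite author's own statement) =====
-- stated objective: alternative
-- what changed: B replaces A's dot-membership test, rsplit and loop over the four category sets by a single character pass that accumulates the characters after the last dot, followed by one lookup in a flat literal extension->category dict.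
import Mathlib
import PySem

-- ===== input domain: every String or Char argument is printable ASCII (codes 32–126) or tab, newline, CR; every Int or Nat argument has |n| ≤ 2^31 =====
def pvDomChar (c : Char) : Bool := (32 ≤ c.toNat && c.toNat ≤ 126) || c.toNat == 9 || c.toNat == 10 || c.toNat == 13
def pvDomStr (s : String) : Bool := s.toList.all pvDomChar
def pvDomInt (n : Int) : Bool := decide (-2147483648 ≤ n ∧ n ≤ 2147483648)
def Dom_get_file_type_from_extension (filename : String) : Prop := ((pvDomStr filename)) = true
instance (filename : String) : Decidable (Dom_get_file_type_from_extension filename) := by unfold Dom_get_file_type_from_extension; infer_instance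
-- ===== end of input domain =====

-- B replaces A's '.'-membership test + rsplit + loop over the four category sets by a single
-- character pass accumulating the text after the last dot, then one flat-dict lookup.

-- ===== PORT A =====
def allowedExtensions : List (String × PySem.Set String) :=
  [("image", PySem.Set.ofList ["png", "jpg", "jpeg", "gif", "webp"]),
   ("video", PySem.Set.ofList ["mp4", "avi", "mov", "mkv", "webm"]),
   ("audio", PySem.Set.ofList ["mp3", "wav", "ogg", "aac", "m4a"]),
   ("file", PySem.Set.ofList ["pdf", "doc", "docx", "txt", "zip", "rar"])]

-- hand port of filename.rsplit('.', 1)[1] (exact whenever '.' occurs in the string, the only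
-- case in which A evaluates it): the characters after the LAST '.'
def afterLastDot (cs : List Char) : List Char :=
  (cs.reverse.takeWhile (fun c => c ≠ '.')).reverse

-- the 'for file_type, extensions in ALLOWED_EXTENSIONS.items(): if extension in extensions: return file_type' loop
def scanTypes : List (String × PySem.Set String) → String → String
  | [], _ => "file"
  | (t, exts) :: rest, ext => if PySem.Set.contains exts ext then t else scanTypes rest ext

def get_file_type_from_extension (filename : String) : String :=
  if PySem.Str.isIn "." filename = false then "file"
  else
    let extension := String.ofList (PySem.Chars.lower (afterLastDot filename.toList))
    scanTypes allowedExtensions extension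

-- ===== PORT B =====
-- the flat literal module-level dict EXT_TO_TYPE
def extToType : PySem.Dict String String :=
  PySem.Dict.ofList
    [("png", "image"), ("jpg", "image"), ("jpeg", "image"), ("gif", "image"), ("webp", "image"),
     ("mp4", "video"), ("avi", "video"), ("mov", "video"), ("mkv", "video"), ("webm", "video"),
     ("mp3", "audio"), ("wav", "audio"), ("ogg", "audio"), ("aac", "audio"), ("m4a", "audio"),
     ("pdf", "file"), ("doc", "file"), ("docx", "file"), ("txt", "file"), ("zip", "file"), ("rar", "file")]

-- Source B's for-loop: state 'ext' is None until a '.' is seen, afterwards the chars since the last '.'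
def scanExt : List Char → Option (List Char) → Option (List Char)
  | [], acc => acc
  | c :: rest, acc =>
      if c = '.' then scanExt rest (some [])
      else scanExt rest (acc.map (fun a => a ++ [c]))

def get_file_type_from_extension_alt (filename : String) : String :=
  match scanExt filename.toList none with
  | none => "file"
  | some ext => PySem.Dict.getD extToType (String.ofList (PySem.Chars.lower ext)) "file"

-- ===== PRECONDITION & SPEC =====
def Spec_get_file_type_from_extension (filename : String) (out : String) : Prop := out = get_file_type_from_extension_alt filename
instance (filename : String) (out : String) : Decidable (Spec_get_file_type_from_extension filename out) := by unfold Spec_get_file_type_from_extension; infer_instance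

-- ===== CLAIM (what is proved, stated in full; the proofs are below) =====
def Claim_equal_get_file_type_from_extension : Prop := ∀ (filename : String), Dom_get_file_type_from_extension filename → Spec_get_file_type_from_extension filename (get_file_type_from_extension filename)

-- ===== LEMMAS AND PROOFS =====

lemma afterLastDot_cons (c : Char) (cs : List Char) :
    afterLastDot (c :: cs)
      = if '.' ∈ cs then afterLastDot cs else (if c = '.' then cs else c :: cs) := by
  unfold afterLastDot
  rw [List.reverse_cons, List.takeWhile_append]
  by_cases h : '.' ∈ cs
  · have hne : ¬ (List.takeWhile (fun c => decide (c ≠ '.')) cs.reverse).length = cs.reverse.length := by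
      intro hl
      have heq := (List.takeWhile_prefix (l := cs.reverse) (fun c => decide (c ≠ '.'))).eq_of_length hl
      have := List.takeWhile_eq_self_iff.1 heq '.' (List.mem_reverse.2 h)
      simp at this
    rw [if_neg hne, if_pos h]
  · have htake : List.takeWhile (fun c => decide (c ≠ '.')) cs.reverse = cs.reverse :=
      List.takeWhile_eq_self_iff.2 (by
        intro x hx
        simpa using fun he : x = '.' => h (he ▸ List.mem_reverse.1 hx))
    rw [if_pos (by rw [htake]), htake, if_neg h]
    by_cases hc : c = '.'
    · simp [hc]
    · simp [hc]

-- the accumulator invariant of Source B's loop, against A's afterLastDot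
lemma scanExt_some (cs : List Char) : ∀ a : List Char,
    scanExt cs (some a) = some (if '.' ∈ cs then afterLastDot cs else a ++ cs) := by
  induction cs with
  | nil => intro a; simp [scanExt]
  | cons c rest ih =>
      intro a
      by_cases hc : c = '.'
      · subst hc
        rw [scanExt, if_pos rfl, ih, afterLastDot_cons]
        by_cases h : '.' ∈ rest <;> simp [h]
      · rw [scanExt, if_neg hc, Option.map_some, ih, afterLastDot_cons]
        by_cases h : '.' ∈ rest <;> simp [h, List.mem_cons, Ne.symm hc]

lemma scanExt_none (cs : List Char) :
    scanExt cs none = if '.' ∈ cs then some (afterLastDot cs) else none := by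
  induction cs with
  | nil => simp [scanExt]
  | cons c rest ih =>
      by_cases hc : c = '.'
      · subst hc
        rw [scanExt, if_pos rfl, scanExt_some, afterLastDot_cons]
        by_cases h : '.' ∈ rest <;> simp [h]
      · rw [scanExt, if_neg hc, Option.map_none, ih, afterLastDot_cons]
        by_cases h : '.' ∈ rest <;> simp [h, List.mem_cons, Ne.symm hc]

-- '.' in filename ↔ the char '.' occurs in its character list
lemma isIn_dot_iff (s : String) : PySem.Str.isIn "." s = true ↔ '.' ∈ s.toList := by
  have hdot : (".").toList = ['.'] := by decide
  rw [PySem.Str.isIn_iff_infix, hdot]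
  constructor
  · intro h; exact h.mem (by simp)
  · intro h
    obtain ⟨l, r, hlr⟩ := List.mem_iff_append.1 h
    exact ⟨l, r, by simp [hlr]⟩

-- a block of pairs with a common value, looked up in an association list
lemma get?_mk_map_append (exts : List String) (t : String) (rest : List (String × String)) (ext : String) :
    (PySem.Dict.mk (exts.map (fun e => (e, t)) ++ rest)).get? ext
      = if exts.contains ext then some t else (PySem.Dict.mk rest).get? ext := by
  induction exts with
  | nil => simp
  | cons a l ih =>
      by_cases h : ext = a
      · simp [PySem.Dict.get?_mk_cons, h]
      · have h' : (a == ext) = false := by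
          simp only [beq_eq_false_iff_ne]; exact fun e => h e.symm
        simp [PySem.Dict.get?_mk_cons, h', ih, h]

-- A's category scan equals a first-match lookup in the flattened association list
lemma scanTypes_eq_get? (cats : List (String × PySem.Set String)) (ext : String) :
    scanTypes cats ext
      = ((PySem.Dict.mk (cats.flatMap (fun p => (p.2 : List String).map (fun e => (e, p.1))))).get? ext).getD "file" := by
  induction cats with
  | nil => simp [scanTypes, PySem.Dict.get?]
  | cons p rest ih =>
      obtain ⟨t, exts⟩ := p
      simp [scanTypes, List.flatMap_cons, get?_mk_map_append, ih,
            PySem.Set.contains_eq_listContains]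
      split <;> rfl

-- B's flat literal dict is exactly A's table flattened (all 21 keys distinct)
lemma extToType_eq :
    extToType = PySem.Dict.mk (allowedExtensions.flatMap (fun p => (p.2 : List String).map (fun e => (e, p.1)))) := by
  decide

-- ===== VERDICT (by name: the statement is the Claim_ definition above) =====
theorem get_file_type_from_extension_spec : Claim_equal_get_file_type_from_extension := by
  intro filename _
  unfold Spec_get_file_type_from_extension
  unfold get_file_type_from_extension get_file_type_from_extension_alt
  rw [scanExt_none]
  by_cases h : '.' ∈ filename.toList
  · have hi : PySem.Str.isIn "." filename = true := (isIn_dot_iff filename).2 h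
    rw [hi, if_neg (by simp), if_pos h]
    simp only [scanTypes_eq_get?, extToType_eq, PySem.Dict.getD_eq_get?_getD]
  · have hi : PySem.Str.isIn "." filename = false := by
      cases hb : PySem.Str.isIn "." filename
      · rfl
      · exact absurd ((isIn_dot_iff filename).1 hb) h
    rw [hi, if_pos rfl, if_neg h]
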